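-- pv_equiv track=rewrite | github.com/da-niao-dan/secretflow | paper_code/server_program.py | median_and_index
-- ===== SOURCE A (Python) =====
-- def median_and_index(zij_list, index_list):
--     n = len(index_list)
--
--     # Initialize the greater counter
--     greater_counter = [0] * n
--     c = 0
--
--     # Populate the greater counter based on zij_list
--     for i in range(n):
--         for _ in range(i + 1, n):
--             greater_counter[i] += zij_list[c]
--             c += 1
--
--     # Calculate half of the list's length for median index
--     half_n = (n - 1) // 2
--
--     # Create a list of indices
--     indices = list(range(n))
--
--     # Sort indices based on greater_counter and use index_list as a tiebreaker
--     sorted_indices = sorted(indices, key=lambda i: greater_counter[i])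
--
--     # Return the index of the median element
--     return sorted_indices[half_n]
-- ===== SOURCE B (Python) =====
-- def median_and_index(zij_list, index_list):
--     n = len(index_list)
--     half_n = (n - 1) // 2
--     # Segment sums: counter i is the sum of the next n-1-i entries of zij_list.
--     counters = []
--     rest = zij_list
--     for i in range(n):
--         seg = n - 1 - i
--         counters.append(sum(rest[:seg]))
--         rest = rest[seg:]
--     # Select the element of stable rank half_n directly, without sorting:
--     # rank(i) = number of j that sort strictly before i.
--     return next(i for i in range(n)
--                 if sum(1 for j in range(n)
--                        if counters[j] < counters[i]
--                        or (counters[j] == counters[i] and j < i)) == half_n)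
-- ===== Notes on version B (the rewrite author's own statement) =====
-- stated objective: alternative
-- what changed: The nested counter loop with a running cursor is replaced by per-index slice segment sums, and the full stable sort plus indexing is replaced by a direct stable-rank selection (return the index whose count of strictly-before indices equals half_n), with no sort at all.
import Mathlib
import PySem

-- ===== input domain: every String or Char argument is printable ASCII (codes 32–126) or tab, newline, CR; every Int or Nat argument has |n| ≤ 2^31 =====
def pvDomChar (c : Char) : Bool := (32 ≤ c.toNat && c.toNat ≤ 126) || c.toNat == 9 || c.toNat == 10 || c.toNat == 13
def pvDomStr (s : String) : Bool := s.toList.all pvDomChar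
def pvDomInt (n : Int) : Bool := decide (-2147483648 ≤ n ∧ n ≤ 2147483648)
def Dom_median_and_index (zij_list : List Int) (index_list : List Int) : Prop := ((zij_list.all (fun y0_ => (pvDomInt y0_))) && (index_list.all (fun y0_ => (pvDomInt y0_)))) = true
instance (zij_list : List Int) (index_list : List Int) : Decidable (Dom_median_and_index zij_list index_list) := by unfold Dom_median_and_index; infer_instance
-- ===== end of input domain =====

-- B replaces A's nested counter loop by per-index slice segment sums and replaces the full
-- stable sort by a direct rank-based selection of the median index (objective: alternative).

-- ===== PORT A =====
def median_and_index (zij_list : List Int) (index_list : List Int) : Int :=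
  let n : Int := index_list.length
  let greater_counter0 : List Int := PySem.List.pyRepeat [0] n    -- [0] * n
  let c0 : Int := 0
  let st := (PySem.List.pyRange 0 n 1).foldl (fun (s : List Int × Int) i =>
      (PySem.List.pyRange (i + 1) n 1).foldl (fun (s : List Int × Int) _ =>
          (PySem.List.pySetD s.1 i (PySem.List.pyGetD s.1 i 0 + PySem.List.pyGetD zij_list s.2 0),
           s.2 + 1)) s) (greater_counter0, c0)
  let greater_counter := st.1
  let half_n : Int := PySem.Int.floordiv (n - 1) 2
  let indices := PySem.List.pyRange 0 n 1
  let sorted_indices := PySem.List.sorted indices (fun i => PySem.List.pyGetD greater_counter i 0) false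
  PySem.List.pyGetD sorted_indices half_n 0

-- ===== PORT B =====
def median_and_index_alt (zij_list : List Int) (index_list : List Int) : Int :=
  let n : Int := index_list.length
  let half_n : Int := PySem.Int.floordiv (n - 1) 2
  let st := (PySem.List.pyRange 0 n 1).foldl (fun (acc : List Int × List Int) i =>
      let seg : Int := n - 1 - i
      (acc.1 ++ [(PySem.List.slice acc.2 none (some seg)).sum],
       PySem.List.slice acc.2 (some seg) none)) ([], zij_list)
  let counters := st.1
  let rank : Int → Int := fun i =>
    ((PySem.List.pyRange 0 n 1).map (fun j =>
        if PySem.List.pyGetD counters j 0 < PySem.List.pyGetD counters i 0 ∨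
           (PySem.List.pyGetD counters j 0 = PySem.List.pyGetD counters i 0 ∧ j < i)
        then (1 : Int) else 0)).sum
  -- next(...) raises StopIteration only when no index matches (n = 0, outside Pre_); .getD 0 is unreachable there
  (((PySem.List.pyRange 0 n 1).find? (fun i => rank i == half_n)).getD 0)

-- ===== PRECONDITION & SPEC =====
-- Pre_ excludes exactly the inputs where A raises IndexError: an empty index_list
-- (sorted_indices[-1] of an empty list) or a zij_list with fewer than n*(n-1)/2 entries (zij_list[c]).
def Pre_median_and_index (zij_list : List Int) (index_list : List Int) : Prop :=
  index_list ≠ [] ∧ index_list.length * (index_list.length - 1) / 2 ≤ zij_list.length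
instance (zij_list : List Int) (index_list : List Int) : Decidable (Pre_median_and_index zij_list index_list) := by unfold Pre_median_and_index; infer_instance
def pvWitness_median_and_index : List Int × List Int := ([1, -2, 3], [10, 20, 30])

def Spec_median_and_index (zij_list : List Int) (index_list : List Int) (out : Int) : Prop := out = median_and_index_alt zij_list index_list
instance (zij_list : List Int) (index_list : List Int) (out : Int) : Decidable (Spec_median_and_index zij_list index_list out) := by unfold Spec_median_and_index; infer_instance

-- ===== CLAIM (what is proved, stated in full; the proofs are below) =====
def Claim_equal_median_and_index : Prop := ∀ (zij_list : List Int) (index_list : List Int), Dom_median_and_index zij_list index_list → Pre_median_and_index zij_list index_list → Spec_median_and_index zij_list index_list (median_and_index zij_list index_list)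

-- ===== LEMMAS AND PROOFS =====

lemma pvAinner (zij : List Int) (iN : Nat) :
    ∀ (ws : List Int) (gc : List Int) (c : Nat), iN < gc.length → c + ws.length ≤ zij.length →
    ws.foldl (fun (s : List Int × Int) _ =>
        (PySem.List.pySetD s.1 (iN : Int) (PySem.List.pyGetD s.1 (iN : Int) 0 + PySem.List.pyGetD zij s.2 0),
         s.2 + 1)) (gc, (c : Int))
    = (PySem.List.pySetD gc (iN : Int) (PySem.List.pyGetD gc (iN : Int) 0 + ((zij.drop c).take ws.length).sum),
       ((c + ws.length : Nat) : Int)) := by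
  intro ws
  induction ws with
  | nil =>
    intro gc c hi _
    simp only [List.foldl_nil, List.length_nil, List.take_zero, List.sum_nil, add_zero,
      PySem.List.pySetD_natCast, PySem.List.pyGetD_natCast,
      List.getD_eq_getElem _ _ hi, List.set_getElem_self]
  | cons w ws ih =>
    intro gc c hi hc
    have hcz : c < zij.length := by simp at hc; omega
    have h1 : ((c : Int) + 1) = ((c + 1 : Nat) : Int) := by push_cast; ring
    simp only [List.foldl_cons, h1]
    rw [ih _ (c+1) (by simpa using hi) (by simp at hc ⊢; omega)]
    have hz : PySem.List.pyGetD zij (c : Int) 0 = zij[c] := by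
      rw [PySem.List.pyGetD_natCast]; exact List.getD_eq_getElem zij 0 hcz
    have hget : PySem.List.pyGetD (PySem.List.pySetD gc (iN : Int) (PySem.List.pyGetD gc (iN : Int) 0 + PySem.List.pyGetD zij (c : Int) 0)) (iN : Int) 0 = PySem.List.pyGetD gc (iN : Int) 0 + PySem.List.pyGetD zij (c : Int) 0 := by
      rw [PySem.List.pyGetD_pySetD_natCast _ _ _ _ _ hi]; simp
    rw [hget]
    have hset : ∀ v v' : Int, PySem.List.pySetD (PySem.List.pySetD gc (iN : Int) v) (iN : Int) v' = PySem.List.pySetD gc (iN : Int) v' := by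
      intro v v'; simp [PySem.List.pySetD_natCast, List.set_set]
    rw [hset]
    have hdrop : zij.drop c = zij[c] :: zij.drop (c+1) := List.drop_eq_getElem_cons hcz
    simp only [Prod.mk.injEq]
    have hd2 : (1:Nat) + c = c + 1 := Nat.add_comm 1 c
    refine ⟨?_, by push_cast [List.length_cons]; ring⟩
    congr 1
    rw [hz, hdrop, List.length_cons, List.take_succ_cons, List.sum_cons]
    ring

def pvOff (n : Nat) : Nat → Nat
  | 0 => 0
  | i + 1 => pvOff n i + (n - 1 - i)

def pvSeg (n : Nat) (zij : List Int) (i : Nat) : Int :=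
  ((zij.drop (pvOff n i)).take (n - 1 - i)).sum

lemma pvOff_mono (n : Nat) : ∀ {a b : Nat}, a ≤ b → pvOff n a ≤ pvOff n b := by
  intro a b h
  induction b with
  | zero => simp [Nat.le_zero.mp h]
  | succ b ih =>
    rcases Nat.eq_or_lt_of_le h with rfl | h'
    · exact le_refl _
    · exact le_trans (ih (Nat.lt_succ_iff.mp h')) (Nat.le_add_right _ _)

lemma pvAouter (zij : List Int) (n : Nat) (hz : pvOff n n ≤ zij.length) :
    ∀ (m : Nat), m ≤ n →
    (PySem.List.pyRange 0 (m : Int) 1).foldl (fun (s : List Int × Int) i =>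
        (PySem.List.pyRange (i + 1) (n : Int) 1).foldl (fun (s : List Int × Int) _ =>
            (PySem.List.pySetD s.1 i (PySem.List.pyGetD s.1 i 0 + PySem.List.pyGetD zij s.2 0),
             s.2 + 1)) s) (List.replicate n 0, 0)
    = ((List.range m).map (pvSeg n zij) ++ List.replicate (n - m) 0, (pvOff n m : Int)) := by
  intro m
  induction m with
  | zero => intro _; simp [PySem.List.pyRange_one_eq_nil, pvOff]
  | succ m ih =>
    intro hm
    have hmn : m ≤ n := Nat.le_of_succ_le hm
    have hcast : ((m + 1 : Nat) : Int) = (m : Int) + 1 := by push_cast; ring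
    rw [hcast, PySem.List.pyRange_one_succ_right (a:=0) (b:=(m : Int)) (by exact_mod_cast Nat.zero_le m), List.foldl_append,
        ih hmn]
    simp only [List.foldl_cons, List.foldl_nil]
    have hlen : ((List.range m).map (pvSeg n zij) ++ List.replicate (n - m) 0).length = n := by
      simp; omega
    have hws : (PySem.List.pyRange ((m : Int) + 1) (n : Int) 1).length = n - 1 - m := by
      rw [PySem.List.length_pyRange_one]; omega
    have := pvAinner zij m (PySem.List.pyRange ((m : Int) + 1) (n : Int) 1)
      ((List.range m).map (pvSeg n zij) ++ List.replicate (n - m) 0) (pvOff n m)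
      (by rw [hlen]; omega)
      (by rw [hws]; have := pvOff_mono n hm; simp [pvOff] at this ⊢; omega)
    rw [hws] at this
    rw [this]
    have hget : PySem.List.pyGetD ((List.range m).map (pvSeg n zij) ++ List.replicate (n - m) 0) (m : Int) 0 = 0 := by
      rw [PySem.List.pyGetD_natCast, List.getD_eq_getElem?_getD, List.getElem?_append_right (by simp)]
      simp
    rw [hget]
    have hset : PySem.List.pySetD ((List.range m).map (pvSeg n zij) ++ List.replicate (n - m) 0) (m : Int) (0 + pvSeg n zij m)
        = (List.range (m + 1)).map (pvSeg n zij) ++ List.replicate (n - (m + 1)) 0 := by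
      rw [PySem.List.pySetD_natCast, List.set_append]
      simp only [List.length_map, List.length_range, lt_irrefl, Nat.sub_self]
      have hrep : n - m = (n - (m + 1)) + 1 := by omega
      rw [hrep, List.replicate_succ, List.set_cons_zero, List.range_succ, List.map_append]
      simp
    simp only [pvSeg] at hset
    rw [hset]
    simp [pvOff]

lemma pvBouter (zij : List Int) (n : Nat) :
    ∀ (m : Nat), m ≤ n →
    (PySem.List.pyRange 0 (m : Int) 1).foldl (fun (acc : List Int × List Int) i =>
        (acc.1 ++ [(PySem.List.slice acc.2 none (some ((n : Int) - 1 - i))).sum],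
         PySem.List.slice acc.2 (some ((n : Int) - 1 - i)) none)) ([], zij)
    = ((List.range m).map (pvSeg n zij), zij.drop (pvOff n m)) := by
  intro m
  induction m with
  | zero => intro _; simp [PySem.List.pyRange_one_eq_nil, pvOff]
  | succ m ih =>
    intro hm
    have hmn : m ≤ n := Nat.le_of_succ_le hm
    have hcast : ((m + 1 : Nat) : Int) = (m : Int) + 1 := by push_cast; ring
    rw [hcast, PySem.List.pyRange_one_succ_right (a:=0) (b:=(m : Int)) (by exact_mod_cast Nat.zero_le m),
        List.foldl_append, ih hmn]
    simp only [List.foldl_cons, List.foldl_nil]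
    have hseg : ((n : Int) - 1 - (m : Int)) = ((n - 1 - m : Nat) : Int) := by omega
    have hnn : (0:Int) ≤ (n : Int) - 1 - (m : Int) := by
      have : m < n := hm
      omega
    rw [PySem.List.slice_to _ hnn, PySem.List.slice_from _ hnn, hseg]
    simp only [Int.toNat_natCast]
    rw [List.take_drop, List.drop_drop]
    simp only [Prod.mk.injEq, pvOff]
    refine ⟨?_, trivial⟩
    rw [List.range_succ, List.map_append]
    congr 1
    simp [pvSeg, List.take_drop]

abbrev pvLex (key : Int → Int) (a b : Int) : Prop := key a < key b ∨ (key a = key b ∧ a < b)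

lemma pvInsertBy_lex (key : Int → Int) (x : Int) :
    ∀ (ys : List Int), ys.Pairwise (pvLex key) → (∀ y ∈ ys, y < x) →
    (PySem.List.insertBy (fun a b => decide (key a < key b)) x ys).Pairwise (pvLex key) := by
  intro ys
  induction ys with
  | nil => intro _ _; simp [PySem.List.insertBy]
  | cons y ys ih =>
    intro hp hlt
    rw [List.pairwise_cons] at hp
    show (if (decide (key x < key y) : Bool) = true then x :: y :: ys
          else y :: PySem.List.insertBy (fun a b => decide (key a < key b)) x ys).Pairwise (pvLex key)
    split_ifs with h
    · simp only [decide_eq_true_eq] at h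
      refine List.Pairwise.cons ?_ (List.Pairwise.cons hp.1 hp.2)
      intro z hz
      rcases List.mem_cons.mp hz with rfl | hz
      · exact Or.inl h
      · rcases (hp.1 z hz) with h' | h'
        · exact Or.inl (lt_trans h h')
        · exact Or.inl (h'.1 ▸ h)
    · simp only [decide_eq_true_eq, not_lt] at h
      refine List.Pairwise.cons ?_ (ih hp.2 (fun z hz => hlt z (by simp [hz])))
      intro z hz
      rw [PySem.List.mem_insertBy] at hz
      rcases hz with rfl | hz
      · rcases lt_or_eq_of_le h with h' | h'
        · exact Or.inl h'
        · exact Or.inr ⟨h', hlt y (by simp)⟩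
      · exact hp.1 z hz

lemma pvFoldl_lex (key : Int → Int) :
    ∀ (xs acc : List Int), acc.Pairwise (pvLex key) → xs.Pairwise (· < ·) →
      (∀ x ∈ xs, ∀ y ∈ acc, y < x) →
    (xs.foldl (fun acc x => PySem.List.insertBy (fun a b => decide (key a < key b)) x acc) acc).Pairwise (pvLex key) := by
  intro xs
  induction xs with
  | nil => intro acc h _ _; simp only [List.foldl_nil]; exact h
  | cons x xs ih =>
    intro acc hacc hxs hlt
    rw [List.pairwise_cons] at hxs
    simp only [List.foldl_cons]
    refine ih _ (pvInsertBy_lex key x acc hacc (hlt x (by simp))) hxs.2 ?_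
    intro x' hx' y hy
    rw [PySem.List.mem_insertBy] at hy
    rcases hy with rfl | hy
    · exact hxs.1 x' hx'
    · exact hlt x' (by simp [hx']) y hy

lemma pvSorted_pairwise_lex (key : Int → Int) (n : Int) :
    (PySem.List.sorted (PySem.List.pyRange 0 n 1) key false).Pairwise (pvLex key) := by
  rw [PySem.List.sorted_eq_foldl_insertBy]
  exact pvFoldl_lex key _ [] (by simp) (PySem.List.pairwise_lt_pyRange_one 0 n) (by simp)

lemma pvLex_irrefl (key : Int → Int) (a : Int) : ¬ pvLex key a a := by
  unfold pvLex; omega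

lemma pvLex_asymm (key : Int → Int) (a b : Int) (h : pvLex key a b) : ¬ pvLex key b a := by
  unfold pvLex at *; omega

lemma pvRank_getElem (key : Int → Int) (n : Int) (k : Nat)
    (hk : k < (PySem.List.sorted (PySem.List.pyRange 0 n 1) key false).length) :
    (PySem.List.pyRange 0 n 1).countP
        (fun j => decide (pvLex key j (PySem.List.sorted (PySem.List.pyRange 0 n 1) key false)[k]))
      = k := by
  set ss := PySem.List.sorted (PySem.List.pyRange 0 n 1) key false with hss
  have hperm : ss.Perm (PySem.List.pyRange 0 n 1) := PySem.List.sorted_perm _ _ _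
  have hpl : ss.Pairwise (pvLex key) := pvSorted_pairwise_lex key n
  rw [← (hperm.countP_eq _)]
  have hsplit : ss = ss.take k ++ ss.drop k := (List.take_append_drop k ss).symm
  rw [List.pairwise_iff_getElem] at hpl
  conv_lhs => rw [hsplit]
  rw [List.countP_append]
  have h1 : (ss.take k).countP (fun j => decide (pvLex key j ss[k])) = (ss.take k).length := by
    rw [List.countP_eq_length]
    intro a ha
    rw [List.mem_take_iff_getElem] at ha
    obtain ⟨i, hi, hai⟩ := ha
    simp only [decide_eq_true_eq]
    rw [← hai]
    exact hpl i k (by omega) hk (by simp at hi; omega)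
  have h2 : (ss.drop k).countP (fun j => decide (pvLex key j ss[k])) = 0 := by
    rw [List.countP_eq_zero]
    intro a ha
    rw [List.mem_drop_iff_getElem] at ha
    obtain ⟨i, hi, hai⟩ := ha
    simp only [decide_eq_true_eq]
    rw [← hai]
    rcases Nat.eq_zero_or_pos i with rfl | hipos
    · simp only [Nat.add_zero]
      exact pvLex_irrefl key ss[k]
    · exact pvLex_asymm key _ _ (hpl k (k + i) hk (by omega) (by omega))
  rw [h1, h2, List.length_take]
  omega

lemma pvOff_closed (n : Nat) : ∀ m, m ≤ n → 2 * pvOff n m = m * (2 * n - m - 1) := by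
  intro m
  induction m with
  | zero => intro _; simp [pvOff]
  | succ m ih =>
    intro hm
    obtain ⟨d, rfl⟩ : ∃ d, n = m + 1 + d := ⟨n - (m + 1), by omega⟩
    have h := ih (by omega)
    simp only [pvOff]
    have e1 : 2 * (m + 1 + d) - m - 1 = m + 2 * d + 1 := by omega
    have e2 : (m + 1 + d) - 1 - m = d := by omega
    have e3 : 2 * (m + 1 + d) - (m + 1) - 1 = m + 2 * d := by omega
    rw [e2, Nat.mul_add, h, e1, e3]
    ring

lemma pvFind_eq_some (p : Int → Bool) :
    ∀ (l : List Int) (x : Int), x ∈ l → p x → (∀ y ∈ l, p y → y = x) → l.find? p = some x := by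
  intro l
  induction l with
  | nil => intro x hx; simp at hx
  | cons a l ih =>
    intro x hx hp hu
    by_cases ha : p a
    · rw [List.find?_cons_of_pos (h := ha)]
      exact congrArg some (hu a (by simp) ha)
    · rw [List.find?_cons_of_neg (h := by simpa using ha)]
      rcases List.mem_cons.mp hx with rfl | hx
      · exact absurd hp ha
      · exact ih x hx hp (fun y hy => hu y (by simp [hy]))

lemma pv_main_eq (zij_list : List Int) (index_list : List Int)
    (h1 : index_list ≠ [])
    (h2 : index_list.length * (index_list.length - 1) / 2 ≤ zij_list.length) :
    median_and_index zij_list index_list = median_and_index_alt zij_list index_list := by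
  simp only [median_and_index, median_and_index_alt]
  set nN := index_list.length with hnN
  have hn1 : 1 ≤ nN := List.length_pos_iff.mpr h1
  have hz : pvOff nN nN ≤ zij_list.length := by
    have hcl := pvOff_closed nN nN (le_refl _)
    have e1 : 2 * nN - nN - 1 = nN - 1 := by omega
    rw [e1] at hcl
    omega
  -- counters agree
  rw [show PySem.List.pyRepeat [0] (nN : Int) = List.replicate nN (0 : Int) by
        rw [PySem.List.pyRepeat_singleton]; simp]
  rw [pvAouter zij_list nN hz nN (le_refl _), pvBouter zij_list nN nN (le_refl _)]
  simp only [Nat.sub_self, List.replicate_zero, List.append_nil]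
  set C := (List.range nN).map (pvSeg nN zij_list) with hC
  set key : Int → Int := fun i => PySem.List.pyGetD C i 0 with hkey
  set ss := PySem.List.sorted (PySem.List.pyRange 0 (nN : Int) 1) key false with hss
  -- half_n as a Nat
  set hN := (nN - 1) / 2 with hhN
  have hhalf : PySem.Int.floordiv ((nN : Int) - 1) 2 = (hN : Int) := by
    rw [show ((nN : Int) - 1) = ((nN - 1 : Nat) : Int) by omega,
        show (2 : Int) = ((2 : Nat) : Int) by norm_num,
        PySem.Int.floordiv_natCast]
  have hlen : ss.length = nN := by
    rw [hss, PySem.List.length_sorted, PySem.List.length_pyRange_one]; simp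
  have hhlt : hN < nN := by omega
  have hhs : hN < ss.length := by omega
  -- A's result is ss[hN]
  have hA : PySem.List.pyGetD ss (PySem.Int.floordiv ((nN : Int) - 1) 2) 0 = ss[hN] := by
    rw [hhalf, PySem.List.pyGetD_eq_getElem _ _ (by positivity) (by exact_mod_cast hhs)]
    simp
  rw [hA, hhalf]
  -- B's rank function is the pvLex count
  have hrank : ∀ i : Int,
      ((PySem.List.pyRange 0 (nN : Int) 1).map (fun j =>
          if PySem.List.pyGetD C j 0 < PySem.List.pyGetD C i 0 ∨
             (PySem.List.pyGetD C j 0 = PySem.List.pyGetD C i 0 ∧ j < i)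
          then (1 : Int) else 0)).sum
      = ((PySem.List.pyRange 0 (nN : Int) 1).countP (fun j => decide (pvLex key j i)) : Int) := by
    intro i
    rw [← PySem.List.sum_map_ite_one_zero (fun j => decide (pvLex key j i))]
    refine congrArg List.sum (List.map_congr_left (fun j _ => ?_))
    simp [pvLex, hkey]
  have hperm : ss.Perm (PySem.List.pyRange 0 (nN : Int) 1) := PySem.List.sorted_perm _ _ _
  have hmem : ss[hN] ∈ PySem.List.pyRange 0 (nN : Int) 1 :=
    hperm.mem_iff.mp (List.getElem_mem hhs)
  have hfind : (PySem.List.pyRange 0 (nN : Int) 1).find?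
      (fun i => (((PySem.List.pyRange 0 (nN : Int) 1).map (fun j =>
          if PySem.List.pyGetD C j 0 < PySem.List.pyGetD C i 0 ∨
             (PySem.List.pyGetD C j 0 = PySem.List.pyGetD C i 0 ∧ j < i)
          then (1 : Int) else 0)).sum) == (hN : Int)) = some ss[hN] := by
    apply pvFind_eq_some
    · exact hmem
    · rw [hrank, beq_iff_eq]
      exact_mod_cast pvRank_getElem key (nN : Int) hN hhs
    · intro y hy hpy
      rw [hrank, beq_iff_eq] at hpy
      have hy' : y ∈ ss := hperm.mem_iff.mpr hy
      obtain ⟨k, hk, hky⟩ := List.mem_iff_getElem.mp hy'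
      have := pvRank_getElem key (nN : Int) k hk
      rw [hky] at this
      rw [this] at hpy
      have hkh : k = hN := by exact_mod_cast hpy
      subst hkh
      exact hky.symm
  rw [hfind]
  rfl

-- ===== VERDICT (by name: the statement is the Claim_ definition above) =====
theorem median_and_index_spec : Claim_equal_median_and_index := by
  intro zij_list index_list _ hpre
  unfold Spec_median_and_index
  exact pv_main_eq zij_list index_list hpre.1 hpre.2
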